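-- pv_equiv track=rewrite | github.com/mateoquartin/Facultad | Todo python/lenguaje/LIBRERIA-FINAL.py | ordenar_por_col_desc
-- ===== SOURCE A (Python) =====
-- def ordenar_por_col_desc( lista): #Ordena la matriz por el valor de una columna de mayor a menor
--     ln = len(lista)
--     hubo_cambio = True
--     i=0
--     while hubo_cambio and i < ln:
--         hubo_cambio = False
--         for  j in range(0, ln-i-1):
--             if lista[j][0] < lista[j+1][0] :
--                 hubo_cambio = True
--                 lista[j] , lista[j+1] = lista[j+1] , lista[j]
--         i+=1
--     return lista
-- ===== SOURCE B (Python) =====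
-- def ordenar_por_col_desc(lista):  # Ordena la matriz por el valor de la primera columna, de mayor a menor
--     lista[:] = sorted(lista, key=lambda f: f[0], reverse=True)
--     return lista
-- ===== Notes on version B (the rewrite author's own statement) =====
-- stated objective: faster
-- what changed: Replaces the hand-written flagged bubble sort with a single call to Python's built-in stable sorted(key=first column, reverse=True), written back in place.
-- outside the precondition, e.g. on ordenar_por_col_desc([[]]): A returns [[]], B raises IndexError
import Mathlib
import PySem

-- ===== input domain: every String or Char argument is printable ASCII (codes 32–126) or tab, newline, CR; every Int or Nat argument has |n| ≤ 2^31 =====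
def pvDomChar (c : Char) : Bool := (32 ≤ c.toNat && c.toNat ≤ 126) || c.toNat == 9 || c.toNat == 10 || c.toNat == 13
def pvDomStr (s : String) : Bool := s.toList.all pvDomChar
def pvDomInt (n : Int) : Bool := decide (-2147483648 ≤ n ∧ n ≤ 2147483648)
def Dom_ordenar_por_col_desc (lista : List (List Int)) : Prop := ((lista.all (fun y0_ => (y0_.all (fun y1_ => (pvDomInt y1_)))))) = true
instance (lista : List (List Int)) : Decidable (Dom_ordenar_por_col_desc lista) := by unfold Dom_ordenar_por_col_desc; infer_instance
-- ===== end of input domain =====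

-- B replaces A's flagged bubble sort by one call to Python's built-in stable sort (objective: faster).
-- Both Pythons sort the list in place and return the same (mutated) object; the theorems are about the returned value.

-- ===== PORT A =====
-- row[0]; under Pre_ every row is nonempty, so the lookup never fails (Python raises IndexError there)
def pvKey (r : List Int) : Int := (PySem.List.pyGet? r 0).getD 0

-- one inner 'for j in range(0, k)' pass: compare/swap adjacent pairs left to right,
-- as the obvious structural recursion on the list; returns (list, hubo_cambio-of-this-pass)
def pvBubblePass (k : Nat) (l : List (List Int)) : List (List Int) × Bool :=
  match k, l with
  | 0, l => (l, false)
  | k+1, x :: y :: rest =>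
      if pvKey x < pvKey y then
        (y :: (pvBubblePass k (x :: rest)).1, true)
      else
        (x :: (pvBubblePass k (y :: rest)).1, (pvBubblePass k (y :: rest)).2)
  | _+1, l => (l, false)

-- the 'while hubo_cambio and i < ln' loop
def pvBubbleLoop (l : List (List Int)) (ln i : Nat) (changed : Bool) : List (List Int) :=
  if h : changed = true ∧ i < ln then
    let p := pvBubblePass (ln - i - 1) l
    pvBubbleLoop p.1 ln (i+1) p.2
  else l
termination_by ln - i
decreasing_by omega

def ordenar_por_col_desc (lista : List (List Int)) : List (List Int) :=
  pvBubbleLoop lista lista.length 0 true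

-- ===== PORT B =====
-- sorted(lista, key=lambda f: f[0], reverse=True)
def ordenar_por_col_desc_alt (lista : List (List Int)) : List (List Int) :=
  PySem.List.sorted lista pvKey true

-- ===== PRECONDITION & SPEC =====
-- Pre_ excludes matrices containing an empty row: with two or more rows A reads row[0] and raises
-- IndexError there, and on a single empty row A returns it unsorted while B's sorted() still
-- evaluates the key and raises — an input A only survives by never looking at it.
def Pre_ordenar_por_col_desc (lista : List (List Int)) : Prop := ∀ row ∈ lista, row ≠ []
instance (lista : List (List Int)) : Decidable (Pre_ordenar_por_col_desc lista) := by unfold Pre_ordenar_por_col_desc; infer_instance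
def pvWitness_ordenar_por_col_desc : List (List Int) := [[3, 1], [5], [3, 2], [2]]

def Spec_ordenar_por_col_desc (lista : List (List Int)) (out : List (List Int)) : Prop := out = ordenar_por_col_desc_alt lista
instance (lista : List (List Int)) (out : List (List Int)) : Decidable (Spec_ordenar_por_col_desc lista out) := by unfold Spec_ordenar_por_col_desc; infer_instance

-- ===== CLAIM (what is proved, stated in full; the proofs are below) =====
def Claim_equal_ordenar_por_col_desc : Prop := ∀ (lista : List (List Int)), Dom_ordenar_por_col_desc lista → Pre_ordenar_por_col_desc lista → Spec_ordenar_por_col_desc lista (ordenar_por_col_desc lista)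

-- ===== LEMMAS AND PROOFS =====

-- the descending order on rows, and the per-key fibre of a list (used to state stability)
def pvDesc (a b : List Int) : Prop := pvKey b ≤ pvKey a
def pvFilt (z : Int) (l : List (List Int))  : List (List Int) := l.filter (fun r => decide (pvKey r = z))

theorem pvFilt_nil (z : Int) : pvFilt z [] = [] := rfl

theorem pvFilt_cons (z : Int) (x : List Int) (l : List (List Int)) :
    pvFilt z (x :: l) = if pvKey x = z then x :: pvFilt z l else pvFilt z l := by
  simp only [pvFilt, List.filter_cons]; split_ifs <;> simp_all

-- a descending list below z has empty z-fibre
theorem pvFilt_eq_nil_of_lt (z : Int) (y : List Int) (l : List (List Int))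
    (hp : (y :: l).Pairwise pvDesc) (hy : pvKey y < z) : pvFilt z (y :: l) = [] := by
  have hall : ∀ b ∈ y :: l, pvKey b ≤ pvKey y := by
    intro b hb
    rcases List.mem_cons.mp hb with rfl | hb
    · exact le_refl _
    · exact (List.pairwise_cons.mp hp).1 b hb
  simp only [pvFilt, List.filter_eq_nil_iff]
  intro r hr
  have := hall r hr
  simp only [decide_eq_true_eq]
  omega

-- two descending lists with the same fibres are equal
theorem pv_uniq (l m : List (List Int)) (hl : l.Pairwise pvDesc) (hm : m.Pairwise pvDesc)
    (hf : ∀ z, pvFilt z l = pvFilt z m) : l = m := by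
  induction l generalizing m with
  | nil =>
    cases m with
    | nil => rfl
    | cons b m' =>
      have := hf (pvKey b)
      rw [pvFilt_nil, pvFilt_cons, if_pos rfl] at this
      exact absurd this (by simp)
  | cons a l' ih =>
    cases m with
    | nil =>
      have := hf (pvKey a)
      rw [pvFilt_nil, pvFilt_cons, if_pos rfl] at this
      exact absurd this (by simp)
    | cons b m' =>
      by_cases hk : pvKey b = pvKey a
      · have hfa := hf (pvKey a)
        rw [pvFilt_cons, if_pos rfl, pvFilt_cons, if_pos hk] at hfa
        have hab : a = b := (List.cons.injEq _ _ _ _ ▸ hfa).1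
        have htl : ∀ z, pvFilt z l' = pvFilt z m' := by
          intro z
          by_cases hz : z = pvKey a
          · subst hz; exact (List.cons.injEq _ _ _ _ ▸ hfa).2
          · have := hf z
            rw [pvFilt_cons, if_neg (fun h => hz h.symm), pvFilt_cons,
              if_neg (fun h => hz (hk ▸ h).symm)] at this
            exact this
        rw [hab, ih m' (List.Pairwise.of_cons hl) (List.Pairwise.of_cons hm) htl]
      · exfalso
        have hfa := hf (pvKey a)
        rw [pvFilt_cons, if_pos rfl, pvFilt_cons, if_neg hk] at hfa
        have ham' : a ∈ m' := by
          have : a ∈ pvFilt (pvKey a) m' := hfa ▸ List.mem_cons_self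
          exact List.mem_of_mem_filter this
        have h1 : pvKey a ≤ pvKey b := (List.pairwise_cons.mp hm).1 a ham'
        have hfb := hf (pvKey b)
        rw [pvFilt_cons (l := m'), if_pos rfl, pvFilt_cons,
          if_neg (fun h => hk (by omega))] at hfb
        have hbl' : b ∈ l' := by
          have : b ∈ pvFilt (pvKey b) l' := by rw [hfb]; exact List.mem_cons_self
          exact List.mem_of_mem_filter this
        have h2 : pvKey b ≤ pvKey a := (List.pairwise_cons.mp hl).1 b hbl'
        exact hk (le_antisymm h2 h1)

-- ---- insertion-sort (port B) side ----

theorem pvIns_pairwise (x : List Int) (acc : List (List Int)) (h : acc.Pairwise pvDesc) :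
    (PySem.List.insertBy (fun a b => decide (pvKey b < pvKey a)) x acc).Pairwise pvDesc := by
  induction acc with
  | nil => simp [PySem.List.insertBy]
  | cons y acc' ih =>
    rw [PySem.List.insertBy]
    by_cases hxy : pvKey y < pvKey x
    · rw [if_pos (by simpa using hxy)]
      refine List.pairwise_cons.mpr ⟨?_, h⟩
      intro b hb
      rcases List.mem_cons.mp hb with rfl | hb
      · exact le_of_lt hxy
      · exact le_trans ((List.pairwise_cons.mp h).1 b hb) (le_of_lt hxy)
    · rw [if_neg (by simpa using hxy)]
      refine List.pairwise_cons.mpr ⟨?_, ih (List.Pairwise.of_cons h)⟩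
      intro b hb
      rcases (PySem.List.mem_insertBy _ _ _ _).mp hb with rfl | hb
      · exact le_of_not_gt hxy
      · exact (List.pairwise_cons.mp h).1 b hb

theorem pvIns_filt (z : Int) (x : List Int) (acc : List (List Int)) (h : acc.Pairwise pvDesc) :
    pvFilt z (PySem.List.insertBy (fun a b => decide (pvKey b < pvKey a)) x acc) =
      if pvKey x = z then pvFilt z acc ++ [x] else pvFilt z acc := by
  induction acc with
  | nil => rw [PySem.List.insertBy]; rw [pvFilt_cons]; simp [pvFilt]
  | cons y acc' ih =>
    rw [PySem.List.insertBy]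
    by_cases hxy : pvKey y < pvKey x
    · rw [if_pos (by simpa using hxy)]
      rw [pvFilt_cons]
      by_cases hxz : pvKey x = z
      · rw [if_pos hxz, if_pos hxz, pvFilt_eq_nil_of_lt z y acc' h (hxz ▸ hxy)]
        rfl
      · rw [if_neg hxz, if_neg hxz]
    · rw [if_neg (by simpa using hxy)]
      rw [pvFilt_cons, ih (List.Pairwise.of_cons h), pvFilt_cons]
      by_cases hxz : pvKey x = z <;> by_cases hyz : pvKey y = z <;>
        simp [hxz, hyz]

theorem pvFold_filt (z : Int) (xs acc : List (List Int)) (h : acc.Pairwise pvDesc) :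
    pvFilt z (xs.foldl (fun acc x => PySem.List.insertBy (fun a b => decide (pvKey b < pvKey a)) x acc) acc) =
      pvFilt z acc ++ pvFilt z xs := by
  induction xs generalizing acc with
  | nil => simp [pvFilt]
  | cons x xs ih =>
    rw [List.foldl_cons, ih _ (pvIns_pairwise x acc h), pvIns_filt z x acc h, pvFilt_cons]
    by_cases hxz : pvKey x = z <;> simp [hxz]

theorem pvSorted_filt (z : Int) (xs : List (List Int)) :
    pvFilt z (PySem.List.sorted xs pvKey true) = pvFilt z xs := by
  rw [PySem.List.sorted_rev_eq_foldl_insertBy, pvFold_filt z xs [] List.Pairwise.nil, pvFilt_nil,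
    List.nil_append]

-- ---- bubble-sort (port A) side ----

theorem pvBubblePass_filt (z : Int) (k : Nat) (l : List (List Int)) :
    pvFilt z (pvBubblePass k l).1 = pvFilt z l := by
  induction k generalizing l with
  | zero => rfl
  | succ k ih =>
    match l with
    | [] => rfl
    | [x] => rfl
    | x :: y :: rest =>
      rw [pvBubblePass]
      by_cases hxy : pvKey x < pvKey y
      · have hne : pvKey x ≠ pvKey y := ne_of_lt hxy
        rw [if_pos (by simpa using hxy)]
        simp only [pvFilt_cons, ih (x :: rest), pvFilt_cons]
        by_cases h1 : pvKey x = z <;> by_cases h2 : pvKey y = z <;> simp_all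
      · rw [if_neg (by simpa using hxy)]
        simp only [pvFilt_cons, ih (y :: rest), pvFilt_cons]

theorem pvBubblePass_false (k : Nat) (l : List (List Int)) (h : (pvBubblePass k l).2 = false) :
    (pvBubblePass k l).1 = l ∧ (l.take (k+1)).IsChain pvDesc := by
  induction k generalizing l with
  | zero =>
    refine ⟨rfl, ?_⟩
    cases l <;> simp
  | succ k ih =>
    match l with
    | [] => exact ⟨rfl, by simp⟩
    | [x] => exact ⟨rfl, by simp⟩
    | x :: y :: rest =>
      rw [pvBubblePass] at h ⊢
      by_cases hxy : pvKey x < pvKey y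
      · rw [if_pos (by simpa using hxy)] at h
        exact absurd h (by simp)
      · rw [if_neg (by simpa using hxy)] at h ⊢
        obtain ⟨he, hc⟩ := ih (y :: rest) h
        refine ⟨by rw [he], ?_⟩
        have hty : (y :: rest).take (k+1) = y :: rest.take k := by simp
        have htx : (x :: y :: rest).take (k+1+1) = x :: y :: rest.take k := by simp
        rw [htx]
        rw [hty] at hc
        exact List.isChain_cons_cons.mpr ⟨le_of_not_gt hxy, hc⟩

-- one pass with k comparisons: the first k+1 slots get permuted, a minimum lands in slot k, the rest is untouched
theorem pvBubblePass_spec (k : Nat) (l : List (List Int)) (hk : k < l.length) :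
    ∃ t m, (pvBubblePass k l).1 = t ++ m :: l.drop (k+1) ∧ t.length = k ∧
      (t ++ [m]).Perm (l.take (k+1)) ∧ (∀ a ∈ t, pvKey m ≤ pvKey a) := by
  induction k generalizing l with
  | zero =>
    match l, hk with
    | x :: rest, _ =>
      exact ⟨[], x, by simp [pvBubblePass], rfl, by simp, by simp⟩
  | succ k ih =>
    match l, hk with
    | x :: y :: rest, hk =>
      rw [pvBubblePass]
      by_cases hxy : pvKey x < pvKey y
      · rw [if_pos (by simpa using hxy)]
        obtain ⟨t, m, heq, hlen, hperm, hmin⟩ := ih (x :: rest) (by simp at hk ⊢; omega)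
        refine ⟨y :: t, m, ?_, by simp [hlen], ?_, ?_⟩
        · simp only [heq]; simp
        · have h2 : (x :: y :: rest).take (k+1+1) = x :: y :: rest.take k := by simp
          have h3 : (x :: rest).take (k+1) = x :: rest.take k := by simp
          rw [List.cons_append, h2]
          have p1 : (y :: (t ++ [m])).Perm (y :: x :: rest.take k) := by
            rw [← h3]; exact hperm.cons y
          exact p1.trans (List.Perm.swap x y _)
        · intro a ha
          rcases List.mem_cons.mp ha with rfl | ha
          · have hx : x ∈ t ++ [m] := hperm.symm.subset (by simp)
            rcases List.mem_append.mp hx with hx | hx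
            · exact le_trans (hmin x hx) (le_of_lt hxy)
            · simp at hx; subst hx; exact le_of_lt hxy
          · exact hmin a ha
      · rw [if_neg (by simpa using hxy)]
        obtain ⟨t, m, heq, hlen, hperm, hmin⟩ := ih (y :: rest) (by simp at hk ⊢; omega)
        refine ⟨x :: t, m, ?_, by simp [hlen], ?_, ?_⟩
        · simp only [heq]; simp
        · have h2 : (x :: y :: rest).take (k+1+1) = x :: y :: rest.take k := by simp
          have h3 : (y :: rest).take (k+1) = y :: rest.take k := by simp
          rw [h2]
          exact (hperm.trans (by rw [h3])).cons x
        · intro a ha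
          rcases List.mem_cons.mp ha with rfl | ha
          · have hy : y ∈ t ++ [m] := hperm.symm.subset (by simp)
            rcases List.mem_append.mp hy with hy | hy
            · exact le_trans (hmin y hy) (le_of_not_gt hxy)
            · simp at hy; subst hy; exact le_of_not_gt hxy
          · exact hmin a ha

theorem pvBubbleLoop_main (n i : Nat) (l : List (List Int)) (changed : Bool)
    (hlen : l.length = n)
    (hch : changed = false → l.Pairwise pvDesc)
    (hdrop : (l.drop (n - i)).Pairwise pvDesc)
    (hdom : ∀ a ∈ l.take (n - i), ∀ b ∈ l.drop (n - i), pvKey b ≤ pvKey a) :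
    (pvBubbleLoop l n i changed).Pairwise pvDesc ∧
      ∀ z, pvFilt z (pvBubbleLoop l n i changed) = pvFilt z l := by
  obtain ⟨d, hd⟩ : ∃ d, n - i = d := ⟨_, rfl⟩
  revert hd hlen hch hdrop hdom
  induction d generalizing i l changed with
  | zero =>
    intro hlen hch hdrop hdom hd
    rw [pvBubbleLoop, dif_neg (by omega)]
    have h0 : n - i = 0 := hd
    rw [h0] at hdrop
    exact ⟨by simpa using hdrop, fun z => rfl⟩
  | succ d ihd =>
    intro hlen hch hdrop hdom hd
    have hin : i < n := by omega
    rw [pvBubbleLoop]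
    by_cases hcond : changed = true ∧ i < n
    · rw [dif_pos hcond]
      have hkl : n - i - 1 < l.length := by omega
      obtain ⟨t, m, heq, hlt, hperm, hmin⟩ := pvBubblePass_spec (n - i - 1) l hkl
      have hk1 : n - i - 1 + 1 = n - i := by omega
      have hmem : m ∈ l.take (n - i) := by
        rw [← hk1]
        exact hperm.subset (by simp)
      have hdropk : (pvBubblePass (n - i - 1) l).1.drop (n - i - 1) =
          m :: l.drop (n - i) := by
        rw [heq, ← hlt, List.drop_left, hlt, hk1]
      have htakek : (pvBubblePass (n - i - 1) l).1.take (n - i - 1) = t := by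
        rw [heq, ← hlt, List.take_left]
      obtain ⟨hp, hfres⟩ := ihd (i + 1) (pvBubblePass (n - i - 1) l).1 (pvBubblePass (n - i - 1) l).2
        (by rw [heq]; simp [hlt]; omega)
        (by
          intro hf
          obtain ⟨he, hchain⟩ := pvBubblePass_false (n - i - 1) l hf
          rw [he]
          rw [← List.take_append_drop (n - i) l]
          letI : Trans pvDesc pvDesc pvDesc := ⟨fun h1 h2 => le_trans h2 h1⟩
          refine List.pairwise_append.mpr ⟨?_, hdrop, hdom⟩
          rw [← hk1]
          exact List.isChain_iff_pairwise.mp hchain)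
        (by
          have h1 : n - (i + 1) = n - i - 1 := by omega
          rw [h1, hdropk]
          refine List.pairwise_cons.mpr ⟨?_, hdrop⟩
          intro b hb
          exact hdom m hmem b hb)
        (by
          have h1 : n - (i + 1) = n - i - 1 := by omega
          rw [h1, hdropk, htakek]
          intro a ha b hb
          rcases List.mem_cons.mp hb with rfl | hb
          · exact hmin a ha
          · have hat : a ∈ l.take (n - i) := by
              rw [← hk1]
              exact hperm.subset (List.mem_append_left _ ha)
            exact hdom a hat b hb)
        (by omega)
      exact ⟨hp, fun z => (hfres z).trans (pvBubblePass_filt z (n - i - 1) l)⟩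
    · rw [dif_neg hcond]
      have hcf : changed = false := by
        cases changed
        · rfl
        · exact absurd ⟨rfl, hin⟩ hcond
      exact ⟨hch hcf, fun z => rfl⟩

-- ===== VERDICT (by name: the statement is the Claim_ definition above) =====
theorem ordenar_por_col_desc_spec : Claim_equal_ordenar_por_col_desc := by
  intro lista _ _
  unfold Spec_ordenar_por_col_desc ordenar_por_col_desc ordenar_por_col_desc_alt
  obtain ⟨hp, hf⟩ := pvBubbleLoop_main lista.length 0 lista true rfl (by simp) (by simp) (by simp)
  refine pv_uniq _ _ hp ?_ ?_
  · exact (PySem.List.sorted_pairwise_rev lista pvKey).imp (fun h => h)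
  · intro z; rw [hf z, pvSorted_filt]
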